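-- pv_equiv track=rewrite | github.com/GOODWORKRINKZ/microbbox | scripts/remove_ifdefs.py | remove_ifdef_blocks
-- ===== SOURCE A (Python) =====
-- def remove_ifdef_blocks(content, features_to_remove):
--     """Удаляет блоки #ifdef для указанных фич, сохраняя содержимое"""
--     lines = content.split('\n')
--     result = []
--     ifdef_stack = []  # Стек открытых директив
--     skip_lines = set()  # Номера строк для пропуска
--
--     # Первый проход: находим парные #ifdef/#endif
--     for i, line in enumerate(lines):
--         stripped = line.strip()
--
--         # Проверяем #ifdef для удаляемых фич
--         for feature in features_to_remove:
--             if f'#ifdef {feature}' in stripped or f'#if defined({feature})' in stripped: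
--                 ifdef_stack.append((i, feature))
--                 skip_lines.add(i)
--                 break
--             # Также проверяем комбинированные условия
--             if feature in stripped and ('#ifdef' in stripped or '#if defined' in stripped):
--                 # Проверяем, что это только наши фичи (нет NEOPIXEL/BUZZER)
--                 if 'FEATURE_NEOPIXEL' not in stripped and 'FEATURE_BUZZER' not in stripped:
--                     ifdef_stack.append((i, feature))
--                     skip_lines.add(i)
--                     break
--
--         # Проверяем #endif
--         if '#endif' in stripped and ifdef_stack:
--             # Проверяем комментарий в #endif
--             comment = stripped.replace('#endif', '').strip()
--             if ifdef_stack: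
--                 start_line, feature = ifdef_stack[-1]
--                 # Проверяем, относится ли этот #endif к нашей директиве
--                 if feature in comment or not comment or comment.startswith('//'):
--                     ifdef_stack.pop()
--                     skip_lines.add(i)
--
--     # Второй проход: формируем результат без пропускаемых строк
--     for i, line in enumerate(lines):
--         if i not in skip_lines:
--             result.append(line)
--
--     return '\n'.join(result)
-- ===== SOURCE B (Python) =====
-- def remove_ifdef_blocks(content, features_to_remove):
--     """Recursive-descent rewrite: each removed #ifdef block is consumed by a
--     recursive call (the directive stack becomes the call stack), splicing the
--     block's inner lines into the output; no skip-set, no index bookkeeping."""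
--     lines = content.split('\n')
--     out = []
--
--     def opens(stripped):
--         for f in features_to_remove:
--             if f'#ifdef {f}' in stripped or f'#if defined({f})' in stripped:
--                 return f
--             if (f in stripped and ('#ifdef' in stripped or '#if defined' in stripped)
--                     and 'FEATURE_NEOPIXEL' not in stripped and 'FEATURE_BUZZER' not in stripped):
--                 return f
--         return None
--
--     def closes(stripped, feature):
--         if '#endif' not in stripped:
--             return False
--         comment = stripped.replace('#endif', '').strip()
--         return feature in comment or not comment or comment.startswith('//')
--
--     def inside(i, feature):
--         # emit kept lines under an open directive; return index after its closing #endif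
--         while i < len(lines):
--             stripped = lines[i].strip()
--             f = opens(stripped)
--             if f is not None:
--                 if closes(stripped, f):   # opened and closed on one line: skip it
--                     i += 1
--                 else:
--                     i = inside(i + 1, f)
--                 continue
--             if closes(stripped, feature):
--                 return i + 1
--             out.append(lines[i])
--             i += 1
--         return i
--
--     i = 0
--     while i < len(lines):
--         stripped = lines[i].strip()
--         f = opens(stripped)
--         if f is not None:
--             if closes(stripped, f):
--                 i += 1
--             else:
--                 i = inside(i + 1, f)
--         else:
--             out.append(lines[i])
--             i += 1
--     return '\n'.join(out)
-- ===== Notes on version B (the rewrite author's own statement) =====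
-- stated objective: alternative
-- what changed: Replaced A's two-pass design (explicit ifdef stack plus a set of skip line indices built over enumerate, then a second filtering pass) with a recursive descent: each removed #ifdef block is consumed by a recursive call whose call stack replaces the explicit stack, inner kept lines are spliced into the output directly, and no line numbers or skip set exist at all.
import Mathlib
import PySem

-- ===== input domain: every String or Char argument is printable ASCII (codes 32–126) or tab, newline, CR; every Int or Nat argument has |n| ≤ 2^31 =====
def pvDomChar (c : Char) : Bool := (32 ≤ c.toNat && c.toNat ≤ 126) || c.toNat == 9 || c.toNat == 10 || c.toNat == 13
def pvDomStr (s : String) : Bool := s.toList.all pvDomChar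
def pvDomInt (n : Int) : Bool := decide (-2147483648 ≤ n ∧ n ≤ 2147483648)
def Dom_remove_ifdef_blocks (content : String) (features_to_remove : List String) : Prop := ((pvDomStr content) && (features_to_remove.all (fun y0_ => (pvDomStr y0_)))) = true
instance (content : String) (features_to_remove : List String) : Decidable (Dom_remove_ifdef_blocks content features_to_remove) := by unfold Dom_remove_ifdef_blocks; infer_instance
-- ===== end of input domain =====

-- ===== PORT A =====
-- B replaces A's two passes (explicit stack + skip-line set, then filtering by index) with a
-- recursive descent in which each removed block is consumed by a recursive call: simpler state, same results.
-- inner 'for feature in features_to_remove: … break' loop of A's pass 1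
def pvFeatLoopA (stripped : List Char) : List (List Char) → Option (List Char)
  | [] => none
  | f :: rest =>
    if PySem.Chars.isIn ("#ifdef ".toList ++ f) stripped || PySem.Chars.isIn ("#if defined(".toList ++ f ++ [')']) stripped then
      some f
    else if PySem.Chars.isIn f stripped && (PySem.Chars.isIn "#ifdef".toList stripped || PySem.Chars.isIn "#if defined".toList stripped) then
      if !PySem.Chars.isIn "FEATURE_NEOPIXEL".toList stripped && !PySem.Chars.isIn "FEATURE_BUZZER".toList stripped then
        some f
      else pvFeatLoopA stripped rest
    else pvFeatLoopA stripped rest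

-- one iteration of A's first pass: state is (ifdef_stack, skip_lines)
def pvStepA (feats : List (List Char)) (st : List (Int × List Char) × PySem.Set Int)
    (p : Int × List Char) : List (Int × List Char) × PySem.Set Int :=
  let stripped := PySem.Chars.strip p.2
  let st1 := match pvFeatLoopA stripped feats with
    | some f => (st.1 ++ [(p.1, f)], PySem.Set.add st.2 p.1)
    | none => st
  if PySem.Chars.isIn "#endif".toList stripped && !st1.1.isEmpty then
    let comment := PySem.Chars.strip (PySem.Chars.replace stripped "#endif".toList [])
    match st1.1.getLast? with
    | some q =>
      if PySem.Chars.isIn q.2 comment || comment.isEmpty || PySem.Chars.startswith comment "//".toList then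
        (st1.1.dropLast, PySem.Set.add st1.2 p.1)
      else st1
    | none => st1
  else st1

def remove_ifdef_blocks (content : String) (features_to_remove : List String) : String :=
  let lines := PySem.Chars.splitOn content.toList ['\n']
  let feats := features_to_remove.map String.toList
  let skip := ((PySem.List.enumerate lines 0).foldl (pvStepA feats) ([], ([] : PySem.Set Int))).2
  let result := (PySem.List.enumerate lines 0).foldl
    (fun acc p => if PySem.Set.contains skip p.1 then acc else acc ++ [p.2]) []
  String.ofList (PySem.Chars.join ['\n'] result)

-- ===== PORT B =====
-- Source B's 'opens' loop: first feature whose directive this line opens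
def pvOpensLoop (stripped : List Char) : List (List Char) → Option (List Char)
  | [] => none
  | f :: rest =>
    if PySem.Chars.isIn ("#ifdef ".toList ++ f) stripped || PySem.Chars.isIn ("#if defined(".toList ++ f ++ [')']) stripped then
      some f
    else if PySem.Chars.isIn f stripped
        && (PySem.Chars.isIn "#ifdef".toList stripped || PySem.Chars.isIn "#if defined".toList stripped)
        && !PySem.Chars.isIn "FEATURE_NEOPIXEL".toList stripped
        && !PySem.Chars.isIn "FEATURE_BUZZER".toList stripped then
      some f
    else pvOpensLoop stripped rest

-- Source B's 'closes': does this stripped line close an open directive for 'feature'?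
def pvCloses (feature stripped : List Char) : Bool :=
  if !PySem.Chars.isIn "#endif".toList stripped then false
  else
    let comment := PySem.Chars.strip (PySem.Chars.replace stripped "#endif".toList [])
    PySem.Chars.isIn feature comment || comment.isEmpty || PySem.Chars.startswith comment "//".toList

-- Source B's 'inside': consume lines under an open directive; returns (kept inner lines, lines after the closing #endif).
-- fuel (≥ number of remaining lines) only makes the recursion structural; it is never exhausted when ≥ length.
def pvGoIn (feats : List (List Char)) : List Char → Nat → List (List Char) → List (List Char) × List (List Char)
  | _, 0, ls => ([], ls)
  | _, _ + 1, [] => ([], [])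
  | feature, n + 1, l :: ls =>
    let stripped := PySem.Chars.strip l
    match pvOpensLoop stripped feats with
    | some f =>
      if pvCloses f stripped then pvGoIn feats feature n ls
      else
        let kr := pvGoIn feats f n ls
        let kr2 := pvGoIn feats feature n kr.2
        (kr.1 ++ kr2.1, kr2.2)
    | none =>
      if pvCloses feature stripped then ([], ls)
      else
        let kr := pvGoIn feats feature n ls
        (l :: kr.1, kr.2)

-- Source B's top-level loop
def pvGoTop (feats : List (List Char)) : Nat → List (List Char) → List (List Char)
  | 0, _ => []
  | _ + 1, [] => []
  | n + 1, l :: ls =>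
    let stripped := PySem.Chars.strip l
    match pvOpensLoop stripped feats with
    | some f =>
      if pvCloses f stripped then pvGoTop feats n ls
      else
        let kr := pvGoIn feats f ls.length ls
        kr.1 ++ pvGoTop feats n kr.2
    | none => l :: pvGoTop feats n ls

def remove_ifdef_blocks_alt (content : String) (features_to_remove : List String) : String :=
  let lines := PySem.Chars.splitOn content.toList ['\n']
  let feats := features_to_remove.map String.toList
  String.ofList (PySem.Chars.join ['\n'] (pvGoTop feats lines.length lines))

-- ===== PRECONDITION & SPEC =====
def Spec_remove_ifdef_blocks (content : String) (features_to_remove : List String) (out : String) : Prop := out = remove_ifdef_blocks_alt content features_to_remove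
instance (content : String) (features_to_remove : List String) (out : String) : Decidable (Spec_remove_ifdef_blocks content features_to_remove out) := by unfold Spec_remove_ifdef_blocks; infer_instance

-- ===== CLAIM (what is proved, stated in full; the proofs are below) =====
def Claim_equal_remove_ifdef_blocks : Prop := ∀ (content : String) (features_to_remove : List String), Dom_remove_ifdef_blocks content features_to_remove → Spec_remove_ifdef_blocks content features_to_remove (remove_ifdef_blocks content features_to_remove)

-- ===== LEMMAS AND PROOFS =====

-- proof-side intermediate: a single left-to-right pass with state (stack of open features, kept lines)
def pvStepB (feats : List (List Char)) (st : List (List Char) × List (List Char))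
    (line : List Char) : List (List Char) × List (List Char) :=
  let stripped := PySem.Chars.strip line
  let t1 : List (List Char) × Bool := match pvFeatLoopA stripped feats with
    | some f => (st.1 ++ [f], true)
    | none => (st.1, false)
  let t2 : List (List Char) × Bool := match t1.1.getLast? with
    | some f => if pvCloses f stripped then (t1.1.dropLast, true) else t1
    | none => t1
  if t2.2 then (t2.1, st.2) else (t2.1, st.2 ++ [line])

theorem opensLoop_eq_featLoopA (stripped : List Char) (feats : List (List Char)) :
    pvOpensLoop stripped feats = pvFeatLoopA stripped feats := by
  induction feats with
  | nil => rfl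
  | cons f rest ih =>
    simp only [pvOpensLoop, pvFeatLoopA, ih]
    split_ifs <;> simp_all

theorem contains_add_ne (s : PySem.Set Int) (i j : Int) (h : i ≠ j) :
    PySem.Set.contains (PySem.Set.add s i) j = PySem.Set.contains s j := by
  cases hc : PySem.Set.contains s j with
  | true =>
    exact (PySem.Set.contains_iff _ j).mpr
      ((PySem.Set.mem_add s i j).mpr (Or.inl ((PySem.Set.contains_iff s j).mp hc)))
  | false =>
    cases hv : PySem.Set.contains (PySem.Set.add s i) j with
    | false => rfl
    | true =>
      rcases (PySem.Set.mem_add s i j).mp ((PySem.Set.contains_iff _ j).mp hv) with hm | hm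
      · rw [(PySem.Set.contains_iff s j).mpr hm] at hc; exact hc
      · exact absurd hm.symm h

theorem stepA_contains_stable (feats : List (List Char)) (stA : List (Int × List Char) × PySem.Set Int)
    (p : Int × List Char) (j : Int) (h : p.1 ≠ j) :
    PySem.Set.contains (pvStepA feats stA p).2 j = PySem.Set.contains stA.2 j := by
  unfold pvStepA
  try dsimp only
  cases hf : pvFeatLoopA (PySem.Chars.strip p.2) feats <;>
    dsimp only <;>
    (try split) <;>
    (try split) <;>
    (try split) <;>
    dsimp only <;>
    simp only [contains_add_ne _ _ _ h]

theorem pass1_contains_stable (feats : List (List Char)) (elines : List (Int × List Char)) :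
    ∀ (st : List (Int × List Char) × PySem.Set Int) (j : Int), (∀ p ∈ elines, p.1 ≠ j) →
    PySem.Set.contains (elines.foldl (pvStepA feats) st).2 j = PySem.Set.contains st.2 j := by
  induction elines with
  | nil => intro st j _; rfl
  | cons p rest ih =>
    intro st j h
    rw [List.foldl_cons, ih _ j (fun q hq => h q (List.mem_cons_of_mem _ hq))]
    exact stepA_contains_stable feats st p j (h p List.mem_cons_self)

-- one line of A's pass 1 (state update + skip decision) corresponds to one step of the single pass
theorem step_correspond (feats : List (List Char)) (stA : List (Int × List Char) × PySem.Set Int)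
    (stB : List (List Char) × List (List Char)) (i : Int) (line : List Char)
    (hstk : stB.1 = stA.1.map (fun x => x.2)) (hns : PySem.Set.contains stA.2 i = false) :
    (pvStepB feats stB line).1 = (pvStepA feats stA (i, line)).1.map (fun x => x.2) ∧
    (pvStepB feats stB line).2
      = (if PySem.Set.contains (pvStepA feats stA (i, line)).2 i then stB.2 else stB.2 ++ [line]) := by
  have hmem : i ∉ stA.2 := by
    intro hm
    rw [(PySem.Set.contains_iff stA.2 i).mpr hm] at hns
    exact Bool.noConfusion hns
  cases hf : pvFeatLoopA (PySem.Chars.strip line) feats with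
  | some f =>
    unfold pvStepA pvStepB pvCloses
    try dsimp only
    simp only [hstk, hf]
    try dsimp only
    have hmap : List.map (fun x => x.2) stA.1 ++ [f] = List.map (fun x => x.2) (stA.1 ++ [(i, f)]) := by
      simp
    have hne2 : (stA.1 ++ [(i, f)]).isEmpty = false := by simp
    simp only [hmap, List.getLast?_map, List.isEmpty_map, hne2, Bool.not_false, Bool.and_true]
    cases hcond : PySem.Chars.isIn "#endif".toList (PySem.Chars.strip line)
    · simp only [Bool.not_false, if_true]
      cases hg : (stA.1 ++ [(i, f)]).getLast? with
      | none => simp at hg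
      | some q => exact ⟨by simp, by simp⟩
    · simp only [Bool.not_true, if_false]
      cases hg : (stA.1 ++ [(i, f)]).getLast? with
      | none => simp at hg
      | some q =>
        by_cases hcomm : (PySem.Chars.isIn q.2
              (PySem.Chars.strip (PySem.Chars.replace (PySem.Chars.strip line) "#endif".toList []))
            || (PySem.Chars.strip (PySem.Chars.replace (PySem.Chars.strip line) "#endif".toList [])).isEmpty
            || PySem.Chars.startswith
              (PySem.Chars.strip (PySem.Chars.replace (PySem.Chars.strip line) "#endif".toList []))
              "//".toList) = true
        · simp at hcomm
          exact ⟨by simp [hcomm], by simp [hcomm]⟩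
        · simp at hcomm
          exact ⟨by simp [hcomm], by simp [hcomm]⟩
  | none =>
    unfold pvStepA pvStepB pvCloses
    try dsimp only
    simp only [hstk, hf]
    try dsimp only
    simp only [List.getLast?_map, List.isEmpty_map]
    cases hg : stA.1.getLast? with
    | none =>
      have hemp : stA.1.isEmpty = true := by
        rw [List.getLast?_eq_none_iff.mp hg]; rfl
      simp [hg, hemp, hmem]
    | some q =>
      have hne : stA.1.isEmpty = false := by
        cases h : stA.1 <;> simp_all
      cases hcond : PySem.Chars.isIn "#endif".toList (PySem.Chars.strip line)
      · simp [hg, hne, hcond, hmem]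
      · by_cases hcomm : (PySem.Chars.isIn q.2
              (PySem.Chars.strip (PySem.Chars.replace (PySem.Chars.strip line) "#endif".toList []))
            || (PySem.Chars.strip (PySem.Chars.replace (PySem.Chars.strip line) "#endif".toList [])).isEmpty
            || PySem.Chars.startswith
              (PySem.Chars.strip (PySem.Chars.replace (PySem.Chars.strip line) "#endif".toList []))
              "//".toList) = true
        · simp at hcomm
          exact ⟨by simp [hg, hne, hcond, hcomm, List.map_dropLast], by simp [hg, hne, hcond, hcomm]⟩
        · simp at hcomm
          exact ⟨by simp [hg, hne, hcond, hcomm], by simp [hg, hne, hcond, hcomm, hmem]⟩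

-- invariant: the single pass equals A's pass 1 followed by A's filtering pass
theorem main_invariant (feats : List (List Char)) (elines : List (Int × List Char)) :
    ∀ (stA : List (Int × List Char) × PySem.Set Int) (stB : List (List Char) × List (List Char)),
    stB.1 = stA.1.map (fun x => x.2) →
    (∀ p ∈ elines, PySem.Set.contains stA.2 p.1 = false) →
    elines.Pairwise (fun p q => p.1 ≠ q.1) →
    ((elines.map (fun x => x.2)).foldl (pvStepB feats) stB).2
      = elines.foldl
          (fun acc p => if PySem.Set.contains (elines.foldl (pvStepA feats) stA).2 p.1 then acc
                        else acc ++ [p.2]) stB.2 := by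
  induction elines with
  | nil => intro stA stB _ _ _; rfl
  | cons p rest ih =>
    intro stA stB hstk hns hpw
    have hpw' := List.pairwise_cons.mp hpw
    have hstable := pass1_contains_stable feats rest (pvStepA feats stA p) p.1
      (fun q hq => Ne.symm (hpw'.1 q hq))
    obtain ⟨hc1, hc2⟩ := step_correspond feats stA stB p.1 p.2 hstk (hns p List.mem_cons_self)
    simp only [Prod.mk.eta] at hc1 hc2
    have hnsrest : ∀ q ∈ rest, PySem.Set.contains (pvStepA feats stA p).2 q.1 = false := by
      intro q hq
      rw [stepA_contains_stable feats stA p q.1 (hpw'.1 q hq)]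
      exact hns q (List.mem_cons_of_mem _ hq)
    have ihr := ih (pvStepA feats stA p) (pvStepB feats stB p.2) hc1 hnsrest hpw'.2
    simp only [List.map_cons, List.foldl_cons]
    rw [ihr, hc2, ← hstable]
    rfl

-- the rest of a pvGoIn call is never longer than its input
theorem goIn_len (feats : List (List Char)) :
    ∀ (n : Nat) (feature : List Char) (ls : List (List Char)),
      (pvGoIn feats feature n ls).2.length ≤ ls.length := by
  intro n
  induction n with
  | zero => intro feature ls; simp [pvGoIn]
  | succ n ih =>
    intro feature ls
    cases ls with
    | nil => simp [pvGoIn]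
    | cons l ls =>
      simp only [pvGoIn]
      cases pvOpensLoop (PySem.Chars.strip l) feats with
      | some f =>
        by_cases h : pvCloses f (PySem.Chars.strip l) = true
        · simp only [h, if_true]
          exact Nat.le_trans (ih feature ls) (Nat.le_succ _)
        · simp only [h, Bool.false_eq_true, if_false]
          try dsimp only
          exact Nat.le_trans (Nat.le_trans (ih feature _) (ih f ls)) (Nat.le_succ _)
      | none =>
        by_cases h : pvCloses feature (PySem.Chars.strip l) = true
        · simp [h]
        · simp only [h, Bool.false_eq_true, if_false]
          try dsimp only
          exact Nat.le_trans (ih feature ls) (Nat.le_succ _)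

-- the single pass run with 'feature' on top of the stack = pvGoIn's kept lines, then the pass on pvGoIn's rest
theorem goIn_bridge (feats : List (List Char)) :
    ∀ (n : Nat) (feature : List Char) (ls : List (List Char)) (stack out : List (List Char)),
      ls.length ≤ n →
      (ls.foldl (pvStepB feats) (stack ++ [feature], out)).2
        = ((pvGoIn feats feature n ls).2.foldl (pvStepB feats)
            (stack, out ++ (pvGoIn feats feature n ls).1)).2 := by
  intro n
  induction n with
  | zero =>
    intro feature ls stack out hlen
    have : ls = [] := List.eq_nil_of_length_eq_zero (Nat.le_zero.mp hlen)
    subst this; simp [pvGoIn]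
  | succ n ih =>
    intro feature ls stack out hlen
    cases ls with
    | nil => simp [pvGoIn]
    | cons l ls =>
      have hlen' : ls.length ≤ n := Nat.le_of_succ_le_succ (by simpa using hlen)
      simp only [List.foldl_cons, pvGoIn]
      have hstep : pvStepB feats (stack ++ [feature], out) l =
          (match pvOpensLoop (PySem.Chars.strip l) feats with
           | some f =>
             if pvCloses f (PySem.Chars.strip l) then (stack ++ [feature], out)
             else (stack ++ [feature] ++ [f], out)
           | none =>
             if pvCloses feature (PySem.Chars.strip l) then (stack, out)
             else (stack ++ [feature], out ++ [l])) := by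
        cases hf : pvFeatLoopA (PySem.Chars.strip l) feats with
        | some f =>
          rw [opensLoop_eq_featLoopA, hf]
          unfold pvStepB
          try dsimp only
          simp only [hf]
          try dsimp only
          have hg : (stack ++ [feature] ++ [f]).getLast? = some f := by simp
          simp only [hg]
          by_cases h : pvCloses f (PySem.Chars.strip l) = true
          · simp [h]
          · simp [h]
        | none =>
          rw [opensLoop_eq_featLoopA, hf]
          unfold pvStepB
          try dsimp only
          simp only [hf]
          try dsimp only
          have hg : (stack ++ [feature]).getLast? = some feature := by simp
          simp only [hg]
          by_cases h : pvCloses feature (PySem.Chars.strip l) = true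
          · simp [h]
          · simp [h]
      rw [hstep]
      cases hf : pvOpensLoop (PySem.Chars.strip l) feats with
      | some f =>
        by_cases h : pvCloses f (PySem.Chars.strip l) = true
        · simp only [h, if_true]
          exact ih feature ls stack out hlen'
        · simp only [h, Bool.false_eq_true, if_false]
          try dsimp only
          have h1 := ih f ls (stack ++ [feature]) out hlen'
          have h2 := ih feature (pvGoIn feats f n ls).2 stack (out ++ (pvGoIn feats f n ls).1)
            (Nat.le_trans (goIn_len feats n f ls) hlen')
          rw [h1, h2, List.append_assoc]
      | none =>
        by_cases h : pvCloses feature (PySem.Chars.strip l) = true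
        · simp only [h, if_true]
          simp
        · simp only [h, Bool.false_eq_true, if_false]
          try dsimp only
          have h1 := ih feature ls stack (out ++ [l]) hlen'
          rw [h1, List.append_assoc]
          rfl

-- the single pass from the empty stack = pvGoTop
theorem goTop_bridge (feats : List (List Char)) :
    ∀ (n : Nat) (ls : List (List Char)) (out : List (List Char)),
      ls.length ≤ n →
      (ls.foldl (pvStepB feats) (([] : List (List Char)), out)).2 = out ++ pvGoTop feats n ls := by
  intro n
  induction n with
  | zero =>
    intro ls out hlen
    have : ls = [] := List.eq_nil_of_length_eq_zero (Nat.le_zero.mp hlen)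
    subst this; simp [pvGoTop]
  | succ n ih =>
    intro ls out hlen
    cases ls with
    | nil => simp [pvGoTop]
    | cons l ls =>
      have hlen' : ls.length ≤ n := Nat.le_of_succ_le_succ (by simpa using hlen)
      simp only [List.foldl_cons, pvGoTop]
      have hstep : pvStepB feats (([] : List (List Char)), out) l =
          (match pvOpensLoop (PySem.Chars.strip l) feats with
           | some f =>
             if pvCloses f (PySem.Chars.strip l) then ([], out)
             else ([f], out)
           | none => ([], out ++ [l])) := by
        cases hf : pvFeatLoopA (PySem.Chars.strip l) feats with
        | some f =>
          rw [opensLoop_eq_featLoopA, hf]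
          unfold pvStepB
          try dsimp only
          simp only [hf]
          try dsimp only
          have hg : ([f] : List (List Char)).getLast? = some f := by simp
          simp only [List.nil_append, hg]
          by_cases h : pvCloses f (PySem.Chars.strip l) = true
          · simp [h]
          · simp [h]
        | none =>
          rw [opensLoop_eq_featLoopA, hf]
          unfold pvStepB
          try dsimp only
          simp [hf]
      rw [hstep]
      cases hf : pvOpensLoop (PySem.Chars.strip l) feats with
      | some f =>
        by_cases h : pvCloses f (PySem.Chars.strip l) = true
        · simp only [h, if_true]
          exact ih ls out hlen'
        · simp only [h, Bool.false_eq_true, if_false]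
          try dsimp only
          have h1 := goIn_bridge feats ls.length f ls [] out (Nat.le_refl _)
          have h2 := ih (pvGoIn feats f ls.length ls).2 (out ++ (pvGoIn feats f ls.length ls).1)
            (Nat.le_trans (goIn_len feats ls.length f ls) hlen')
          have : ([] : List (List Char)) ++ [f] = [f] := rfl
          rw [← this, h1, h2, List.append_assoc]
      | none =>
        rw [ih ls (out ++ [l]) hlen', List.append_assoc]
        rfl

-- the two ports agree on every input
theorem ports_agree (content : String) (features_to_remove : List String) :
    remove_ifdef_blocks content features_to_remove = remove_ifdef_blocks_alt content features_to_remove := by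
  unfold remove_ifdef_blocks remove_ifdef_blocks_alt
  try dsimp only
  have hmap : (PySem.List.enumerate (PySem.Chars.splitOn content.toList ['\n']) 0).map (fun x => x.2)
      = PySem.Chars.splitOn content.toList ['\n'] := PySem.List.map_snd_enumerate _ _
  have hpw : (PySem.List.enumerate (PySem.Chars.splitOn content.toList ['\n']) 0).Pairwise
      (fun p q => p.1 ≠ q.1) :=
    (PySem.List.pairwise_lt_enumerate _ _).imp (fun h => ne_of_lt h)
  have hmain := main_invariant (features_to_remove.map String.toList)
      (PySem.List.enumerate (PySem.Chars.splitOn content.toList ['\n']) 0)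
      ([], ([] : PySem.Set Int)) ([], []) rfl (fun p _ => rfl) hpw
  rw [hmap] at hmain
  rw [← hmain]
  have htop := goTop_bridge (features_to_remove.map String.toList)
      (PySem.Chars.splitOn content.toList ['\n']).length
      (PySem.Chars.splitOn content.toList ['\n']) [] (Nat.le_refl _)
  rw [htop]
  rfl

-- ===== VERDICT (by name: the statement is the Claim_ definition above) =====
theorem remove_ifdef_blocks_spec : Claim_equal_remove_ifdef_blocks := by
  intro content features_to_remove _
  unfold Spec_remove_ifdef_blocks
  exact ports_agree content features_to_remove
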